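-- pv_equiv track=rewrite | github.com/usatya99/Edyst-Codevita-2020-Solutions | MATH/Numbers/Pascal_pyramid_(codevita_round_2).py | solve
-- ===== SOURCE A (Python) =====
-- def solve(l):
--     if len(l)==2:
--         return l[0]*l[1]
--     else:
--         c=[]
--         for i in range(len(l)-1):
--             c.append(l[i]+l[i+1])
--         return solve(c)
-- ===== SOURCE B (Python) =====
-- def solve(l):
--     # One pass: the length-2 reduction leaves the two binomial-weighted sums
--     # sum C(m,i)*l[i] and sum C(m,i)*l[i+1] with m = len(l)-2; multiply them.
--     m = len(l) - 2
--     s1 = l[0]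
--     s2 = l[1]
--     coef = 1
--     for i in range(1, m + 1):
--         coef = coef * (m - i + 1) // i
--         s1 += coef * l[i]
--         s2 += coef * l[i + 1]
--     return s1 * s2
-- ===== Notes on version B (the rewrite author's own statement) =====
-- stated objective: faster
-- what changed: Replaces the O(n^2) iterated adjacent-sum reduction with one pass computing the two binomial-weighted (Pascal-coefficient) sums directly and multiplying them.
import Mathlib
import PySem

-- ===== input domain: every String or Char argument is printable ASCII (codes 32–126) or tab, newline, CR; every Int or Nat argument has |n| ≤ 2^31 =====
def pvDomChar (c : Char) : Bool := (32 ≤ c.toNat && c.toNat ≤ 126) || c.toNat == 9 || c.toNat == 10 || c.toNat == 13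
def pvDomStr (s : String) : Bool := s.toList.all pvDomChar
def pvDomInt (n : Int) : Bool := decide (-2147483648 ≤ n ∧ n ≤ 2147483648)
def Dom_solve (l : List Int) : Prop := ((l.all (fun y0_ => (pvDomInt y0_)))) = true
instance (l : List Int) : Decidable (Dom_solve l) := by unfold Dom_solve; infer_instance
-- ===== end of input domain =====

set_option maxRecDepth 4000


-- B replaces A's O(n^2) iterated adjacent-sum reduction by a single pass computing the
-- two Pascal-coefficient weighted sums directly (measured asymptotically faster).

-- ===== PORT A =====
-- the loop 'c=[]; for i in range(len(l)-1): c.append(l[i]+l[i+1])'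
def solveAdj (l : List Int) : List Int :=
  (List.range (l.length - 1)).foldl
    (fun c (i : Nat) => c ++ [PySem.List.pyGetD l (i : Int) 0 + PySem.List.pyGetD l ((i : Int) + 1) 0]) []

-- A's recursion, with fuel = the initial length: each recursive call shortens the list by
-- one, so the fuel never runs out on the admitted inputs (length ≥ 2); on length < 2 the
-- Python recurses forever (RecursionError), excluded by Pre_solve.
def solveGo (fuel : Nat) (l : List Int) : Int :=
  match fuel with
  | 0 => 0
  | Nat.succ f =>
      if l.length = 2 then PySem.List.pyGetD l 0 0 * PySem.List.pyGetD l 1 0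
      else solveGo f (solveAdj l)

def solve (l : List Int) : Int := solveGo l.length l

-- ===== PORT B =====
-- l[0], l[1], l[i], l[i+1] are ported with pyGetD: on Pre_ (length ≥ 2) every index the
-- loop touches is in range, so this is exact; on length < 2 the Python B raises IndexError.
def solve_alt (l : List Int) : Int :=
  let m : Int := (l.length : Int) - 2
  let s1 := PySem.List.pyGetD l 0 0
  let s2 := PySem.List.pyGetD l 1 0
  let r := (PySem.List.pyRange 1 (m + 1) 1).foldl
    (fun (st : Int × Int × Int) i =>
      let coef := PySem.Int.floordiv (st.2.2 * (m - i + 1)) i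
      (st.1 + coef * PySem.List.pyGetD l i 0,
       st.2.1 + coef * PySem.List.pyGetD l (i + 1) 0,
       coef)) (s1, s2, (1 : Int))
  r.1 * r.2.1

-- ===== PRECONDITION & SPEC =====
-- Pre_: on length < 2 A never returns (infinite recursion → RecursionError), and B raises
-- IndexError; both are excluded.
def Pre_solve (l : List Int) : Prop := 2 ≤ l.length
instance (l : List Int) : Decidable (Pre_solve l) := by unfold Pre_solve; infer_instance

def pvWitness_solve : List Int := [1, 2, 3]

def Spec_solve (l : List Int) (out : Int) : Prop := out = solve_alt l
instance (l : List Int) (out : Int) : Decidable (Spec_solve l out) := by unfold Spec_solve; infer_instance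

-- ===== CLAIM (what is proved, stated in full; the proofs are below) =====
def Claim_equal_solve : Prop := ∀ (l : List Int), Dom_solve l → Pre_solve l → Spec_solve l (solve l)

-- ===== LEMMAS AND PROOFS =====

-- the binomial-weighted partial sum: ∑_{j<i} C(m,j) * l[j+s]
def pS (l : List Int) (m s i : Nat) : Int :=
  ∑ j ∈ Finset.range i, (Nat.choose m j : Int) * l.getD (j + s) 0

-- Pascal recombination of the weighted sums
lemma pascal_sum (m : Nat) (f : Nat → Int) :
    ∑ j ∈ Finset.range (m + 2), (Nat.choose (m + 1) j : Int) * f j =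
      (∑ j ∈ Finset.range (m + 1), (Nat.choose m j : Int) * f j) +
      ∑ j ∈ Finset.range (m + 1), (Nat.choose m j : Int) * f (j + 1) := by
  have h1 : ∑ j ∈ Finset.range (m + 2), (Nat.choose m j : Int) * f j =
      ∑ j ∈ Finset.range (m + 1), (Nat.choose m j : Int) * f j := by
    rw [Finset.sum_range_succ, Nat.choose_succ_self]
    simp
  rw [Finset.sum_range_succ' (fun j => (Nat.choose (m + 1) j : Int) * f j)]
  rw [← h1, Finset.sum_range_succ' (fun j => (Nat.choose m j : Int) * f j)]
  simp only [Nat.choose_succ_succ, Nat.choose_zero_right]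
  push_cast
  rw [Finset.sum_congr rfl (fun j _ => add_mul ((Nat.choose m j : Int)) _ (f (j+1))),
    Finset.sum_add_distrib]
  ring

lemma solveAdj_eq_map (l : List Int) :
    solveAdj l = (List.range (l.length - 1)).map (fun i => l.getD i 0 + l.getD (i + 1) 0) := by
  unfold solveAdj
  have : ∀ (r : List Nat) (acc : List Int),
      r.foldl (fun c (i : Nat) => c ++ [PySem.List.pyGetD l (i : Int) 0 + PySem.List.pyGetD l ((i : Int) + 1) 0]) acc
        = acc ++ r.map (fun i => l.getD i 0 + l.getD (i + 1) 0) := by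
    intro r
    induction r with
    | nil => simp
    | cons a t ih =>
        intro acc
        have hc : ((a : Int) + 1) = ((a + 1 : Nat) : Int) := by push_cast; ring
        rw [List.foldl_cons, ih, List.map_cons, hc,
          PySem.List.pyGetD_natCast, PySem.List.pyGetD_natCast]
        simp
  simpa using this (List.range (l.length - 1)) []

lemma length_solveAdj (l : List Int) : (solveAdj l).length = l.length - 1 := by
  simp [solveAdj_eq_map]

lemma getD_solveAdj (l : List Int) (j : Nat) (hj : j < l.length - 1) :
    (solveAdj l).getD j 0 = l.getD j 0 + l.getD (j + 1) 0 := by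
  rw [solveAdj_eq_map, List.getD_eq_getElem?_getD, List.getElem?_map]
  simp [List.getElem?_range hj]

-- the Pascal step for the full weighted sums
lemma pS_step (l : List Int) (n s : Nat) (hs : s ≤ 1) (hn : n + 3 ≤ l.length) :
    pS (solveAdj l) n s (n + 1) = pS l (n + 1) s (n + 2) := by
  unfold pS
  rw [pascal_sum n (fun j => l.getD (j + s) 0)]
  have hadj : ∀ j ∈ Finset.range (n + 1),
      (Nat.choose n j : Int) * (solveAdj l).getD (j + s) 0 =
      (Nat.choose n j : Int) * (l.getD (j + s) 0 + l.getD (j + s + 1) 0) := by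
    intro j hj
    rw [Finset.mem_range] at hj
    rw [getD_solveAdj l (j + s) (by omega)]
  rw [Finset.sum_congr rfl hadj]
  rw [Finset.sum_congr rfl (fun j _ => mul_add ((Nat.choose n j : Int)) _ _), Finset.sum_add_distrib]
  congr 1
  apply Finset.sum_congr rfl
  intro j hj
  congr 2
  omega

-- A computes the two weighted sums' product
lemma solveGo_char : ∀ (n : Nat) (l : List Int), l.length = n → 2 ≤ n →
    solveGo n l = pS l (n - 2) 0 (n - 1) * pS l (n - 2) 1 (n - 1) := by
  intro n
  induction n with
  | zero => intro l _ h; omega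
  | succ k ih =>
    intro l hl h2
    by_cases hk : l.length = 2
    · have hk1 : k = 1 := by omega
      subst hk1
      obtain ⟨a, b, rfl⟩ := List.length_eq_two.mp hk
      simp [solveGo, pS, PySem.List.pyGetD, PySem.List.pyGet?, PySem.List.pyIdx?]
    · have hk2 : 2 ≤ k := by omega
      have hstep : solveGo (k + 1) l = solveGo k (solveAdj l) := by
        rw [solveGo]
        simp [hk]
      have hlen : (solveAdj l).length = k := by rw [length_solveAdj]; omega
      rw [hstep, ih _ hlen hk2]
      have e1 : k - 1 = (k - 2) + 1 := by omega
      have e2 : k = (k - 2) + 2 := by omega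
      have e3 : k + 1 - 2 = (k - 2) + 1 := by omega
      have e4 : k + 1 - 1 = (k - 2) + 2 := by omega
      rw [e1, e3, e4]
      rw [pS_step l (k - 2) 0 (by omega) (by omega), pS_step l (k - 2) 1 (by omega) (by omega)]

-- B's loop invariant: before the iteration for index i the state is the pair of partial
-- weighted sums up to i together with the previous coefficient C(mN, i-1)
lemma loopB (l : List Int) (mN : Nat) :
    ∀ (k i : Nat), 1 ≤ i → i + k = mN + 1 →
      (List.range' i k).foldl (fun (st : Int × Int × Int) (j : Nat) =>
        (st.1 + PySem.Int.floordiv (st.2.2 * ((mN : Int) - (j : Int) + 1)) (j : Int) * PySem.List.pyGetD l (j : Int) 0,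
         st.2.1 + PySem.Int.floordiv (st.2.2 * ((mN : Int) - (j : Int) + 1)) (j : Int) * PySem.List.pyGetD l ((j : Int) + 1) 0,
         PySem.Int.floordiv (st.2.2 * ((mN : Int) - (j : Int) + 1)) (j : Int)))
        (pS l mN 0 i, pS l mN 1 i, (Nat.choose mN (i - 1) : Int))
      = (pS l mN 0 (mN + 1), pS l mN 1 (mN + 1), (Nat.choose mN mN : Int)) := by
  intro k
  induction k with
  | zero =>
    intro i h1 hi
    have : i = mN + 1 := by omega
    subst this
    simp
  | succ k ih =>
    intro i h1 hi
    have him : i ≤ mN := by omega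
    rw [List.range'_succ, List.foldl_cons]
    have h3 : PySem.Int.floordiv ((Nat.choose mN (i - 1) : Int) * ((mN : Int) - (i : Int) + 1)) (i : Int)
        = (Nat.choose mN i : Int) := by
      rw [show ((mN : Int) - (i : Int) + 1) = ((mN - (i - 1) : Nat) : Int) from by omega,
        show ((Nat.choose mN (i - 1) : Int) * ((mN - (i - 1) : Nat) : Int)) = ((Nat.choose mN (i - 1) * (mN - (i - 1)) : Nat) : Int) from by push_cast; ring,
        PySem.Int.floordiv_natCast]
      congr 1
      obtain ⟨i', rfl⟩ : ∃ i', i = i' + 1 := ⟨i - 1, by omega⟩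
      simp only [Nat.add_sub_cancel]
      rw [← Nat.choose_succ_right_eq]
      exact Nat.mul_div_cancel _ (by omega)
    have h1' : pS l mN 0 i + (Nat.choose mN i : Int) * PySem.List.pyGetD l (i : Int) 0
        = pS l mN 0 (i + 1) := by
      rw [PySem.List.pyGetD_natCast]
      unfold pS
      rw [Finset.sum_range_succ]
      simp
    have h2' : pS l mN 1 i + (Nat.choose mN i : Int) * PySem.List.pyGetD l ((i : Int) + 1) 0
        = pS l mN 1 (i + 1) := by
      rw [show ((i : Int) + 1) = ((i + 1 : Nat) : Int) from by push_cast; ring,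
        PySem.List.pyGetD_natCast]
      unfold pS
      rw [Finset.sum_range_succ]
    rw [h3, h1', h2']
    have := ih (i + 1) (by omega) (by omega)
    simpa [show i + 1 - 1 = i from by omega] using this
  
-- B computes the same product
lemma solve_alt_char (l : List Int) (h : 2 ≤ l.length) :
    solve_alt l = pS l (l.length - 2) 0 (l.length - 1) * pS l (l.length - 2) 1 (l.length - 1) := by
  obtain ⟨mN, hm⟩ : ∃ m, l.length = m + 2 := ⟨l.length - 2, by omega⟩
  simp only [solve_alt]
  rw [show (l.length : Int) - 2 = (mN : Int) from by omega]
  rw [PySem.List.pyRange_one]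
  rw [show (((mN : Int) + 1) - 1).toNat = mN from by omega]
  have hmap : (List.range mN).map (fun k : Nat => (1 : Int) + (k : Int))
      = (List.range' 1 mN).map (fun j : Nat => (j : Int)) := by
    rw [List.range'_eq_map_range]
    simp [List.map_map, Function.comp]
  rw [hmap, List.foldl_map]
  have hs1 : PySem.List.pyGetD l 0 0 = pS l mN 0 1 := by
    rw [show (0 : Int) = ((0 : Nat) : Int) from rfl, PySem.List.pyGetD_natCast]
    simp [pS]
  have hs2 : PySem.List.pyGetD l 1 0 = pS l mN 1 1 := by
    rw [show (1 : Int) = ((0 + 1 : Nat) : Int) from rfl, PySem.List.pyGetD_natCast]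
    simp [pS]
  rw [hs1, hs2]
  have hinit : ((pS l mN 0 1, pS l mN 1 1, (1 : Int)) : Int × Int × Int)
      = (pS l mN 0 1, pS l mN 1 1, (Nat.choose mN (1 - 1) : Int)) := by norm_num
  rw [hinit, loopB l mN mN 1 (by omega) (by omega)]
  rw [hm]
  simp

-- ===== VERDICT (by name: the statement is the Claim_ definition above) =====
theorem solve_spec : Claim_equal_solve := by
  intro l _ hp
  unfold Spec_solve
  rw [show solve l = solveGo l.length l from rfl,
    solveGo_char l.length l rfl hp, solve_alt_char l hp]
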